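-- pv_equiv track=rewrite | github.com/graphsignal/solver-demo | solutions/325-B.py | find_possible_teams
-- ===== SOURCE A (Python) =====
-- def tournament_games(t):
--     """
--     Calculate the total number of games played in the tournament if we start with `t` teams.
--     """
--     games = 0
--     while t > 1:
--         # Even elimination rounds
--         games += t // 2
--         t = (t + 1) // 2  # Advance half the teams; if odd, round up a team
--
--         # If we reach 2 or less teams, consider round-robin games
--         if t == 2:
--             games += 1  # Only one game needed if two teams remain
--             break
--     return games
--
-- def find_possible_teams(n):
--     """
--     Find all possible numbers of teams that result in exactly n games being played.
--     """
--     if n < 1: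
--         return [-1]
--
--     candidates = []
--     t = 2
--     while True:
--         games = tournament_games(t)
--         if games > n:
--             break
--         if games == n:
--             candidates.append(t)
--         t += 1
--
--     return candidates if candidates else [-1]
-- ===== SOURCE B (Python) =====
-- def find_possible_teams(n):
--     # Single-elimination with byes plays exactly t-1 games, so t = n+1 is the
--     # unique team count producing n games (n >= 1).
--     return [-1] if n < 1 else [n + 1]
-- ===== Notes on version B (the rewrite author's own statement) =====
-- stated objective: faster
-- what changed: Replaced A's scan over all candidate team counts (each evaluated by simulating the tournament) with the closed form games(t)=t-1, so the answer is [n+1] for n>=1 and [-1] otherwise.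
import Mathlib
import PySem

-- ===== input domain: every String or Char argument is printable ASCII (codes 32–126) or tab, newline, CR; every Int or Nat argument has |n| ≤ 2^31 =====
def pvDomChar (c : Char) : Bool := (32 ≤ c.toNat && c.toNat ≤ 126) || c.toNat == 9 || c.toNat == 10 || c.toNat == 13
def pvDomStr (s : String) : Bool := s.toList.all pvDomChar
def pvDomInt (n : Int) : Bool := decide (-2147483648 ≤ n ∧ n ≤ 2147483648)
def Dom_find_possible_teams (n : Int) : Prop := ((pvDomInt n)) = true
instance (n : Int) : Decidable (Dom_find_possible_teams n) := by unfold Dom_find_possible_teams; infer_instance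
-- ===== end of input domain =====

-- B replaces A's candidate scan with the closed form games(t) = t-1: answer [n+1] for n ≥ 1, else [-1].

-- ===== PORT A =====
-- while-loop of tournament_games; the Nat fuel is only a totality guard (t.toNat bounds the
-- number of halving iterations, proved in pvTgLoop_eq below), the loop body is A's verbatim
def pvTgLoop : Nat → Int → Int → Int
  | 0, games, _ => games
  | fuel + 1, games, t =>
    if 1 < t then
      let g := games + PySem.Int.floordiv t 2
      let t' := PySem.Int.floordiv (t + 1) 2
      if t' = 2 then g + 1 else pvTgLoop fuel g t'
    else games

def tournament_games (t : Int) : Int := pvTgLoop t.toNat 0 t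

-- 'while True' loop of find_possible_teams; fuel n.toNat + 1 covers the t = 2 .. n+2 iterations
-- (fuel running out returns candidates, exactly the loop's break branch)
def pvFptLoop : Nat → Int → List Int → Int → List Int
  | 0, _, candidates, _ => candidates
  | fuel + 1, n, candidates, t =>
    if tournament_games t > n then candidates
    else pvFptLoop fuel n (if tournament_games t = n then candidates ++ [t] else candidates) (t + 1)

def find_possible_teams (n : Int) : List Int :=
  if n < 1 then [-1]
  else
    let candidates := pvFptLoop (n.toNat + 1) n [] 2
    if candidates = [] then [-1] else candidates

-- ===== PORT B =====
def find_possible_teams_alt (n : Int) : List Int := if n < 1 then [-1] else [n + 1]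

-- ===== PRECONDITION & SPEC =====
def Spec_find_possible_teams (n : Int) (out : List Int) : Prop := out = find_possible_teams_alt n
instance (n : Int) (out : List Int) : Decidable (Spec_find_possible_teams n out) := by unfold Spec_find_possible_teams; infer_instance

-- ===== CLAIM (what is proved, stated in full; the proofs are below) =====
def Claim_equal_find_possible_teams : Prop := ∀ (n : Int), Dom_find_possible_teams n → Spec_find_possible_teams n (find_possible_teams n)

-- ===== LEMMAS AND PROOFS =====
-- a tournament on t ≥ 2 teams plays t - 1 games (fuel ≥ t suffices)
theorem pvTgLoop_eq (fuel : Nat) (g t : Int) (h2 : 2 ≤ t) (hf : t ≤ (fuel : Int)) :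
    pvTgLoop fuel g t = g + (t - 1) := by
  induction fuel generalizing g t with
  | zero => omega
  | succ fuel ih =>
    rw [pvTgLoop, if_pos (by omega : 1 < t)]
    simp only [PySem.Int.floordiv_eq_ediv_of_pos (by omega : (0:Int) < 2)]
    by_cases hc : (t + 1) / 2 = (2 : Int)
    · rw [if_pos hc]; omega
    · rw [if_neg hc]
      by_cases h5 : 2 ≤ (t + 1) / 2
      · rw [ih (g + t / 2) ((t + 1) / 2) h5 (by omega)]; omega
      · -- then t = 2 and the recursive call hits the guard-false branch
        have ht2 : t = 2 := by omega
        subst ht2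
        cases fuel with
        | zero => rw [pvTgLoop]; norm_num
        | succ fuel => rw [pvTgLoop]; norm_num

theorem tournament_games_eq (t : Int) (h2 : 2 ≤ t) : tournament_games t = t - 1 := by
  unfold tournament_games
  rw [pvTgLoop_eq t.toNat 0 t h2 (by omega)]
  ring

theorem pvFptLoop_eq (fuel : Nat) (n : Int) (cands : List Int) (t : Int)
    (h2 : 2 ≤ t) (hle : t ≤ n + 1) (hf : n + 2 - t ≤ (fuel : Int)) :
    pvFptLoop fuel n cands t = cands ++ [n + 1] := by
  induction fuel generalizing cands t with
  | zero => omega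
  | succ fuel ih =>
    have hg := tournament_games_eq t h2
    rw [pvFptLoop, if_neg (by omega)]
    by_cases heq : t = n + 1
    · rw [if_pos (by omega)]
      have hg' := tournament_games_eq (t + 1) (by omega)
      cases fuel with
      | zero => simp [pvFptLoop, heq]
      | succ fuel => rw [pvFptLoop, if_pos (by omega)]; simp [heq]
    · rw [if_neg (by omega)]
      exact ih cands (t + 1) (by omega) (by omega) (by omega)

-- ===== VERDICT (by name: the statement is the Claim_ definition above) =====
theorem find_possible_teams_spec : Claim_equal_find_possible_teams := by
  intro n _
  unfold Spec_find_possible_teams find_possible_teams find_possible_teams_alt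
  by_cases hn : n < 1
  · simp [hn]
  · rw [if_neg hn, if_neg hn]
    have := pvFptLoop_eq (n.toNat + 1) n [] 2 (by omega) (by omega) (by omega)
    simp [this]
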